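-- pv_equiv track=rewrite | github.com/coooow0/Algorithm | 프로그래머스/1/72410. 신규 아이디 추천/신규 아이디 추천.py | solution
-- ===== SOURCE A (Python) =====
-- def solution(new_id):
--
--     # 1단계
--     new_id = new_id.lower()
--
--     # 2단계
--     arr = []
--
--     for i in new_id:
--         if i in ['-', '_', '.'] or ord('a') <= ord(i) and ord('z') >= ord(i) or ord('0') <= ord(i) and ord('9') >= ord(i):
--             arr.append(i)
--
--     new_id = arr
--
--     # 3단계
--     dot = 0
--     arr = []
--
--     for i in new_id:
--         if i == '.':
--             dot += 1
--
--         else: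
--             if dot:
--                 arr.append('.')
--                 dot = 0
--                 arr.append(i)
--             else:
--                 arr.append(i)
--
--     # 4단계
--     new_id = ''
--
--     for i in arr:
--         new_id += i
--     new_id = new_id.strip('.')
--
--     # 5단계
--
--     if not len(new_id):
--         new_id = 'a'
--
--     elif len(new_id) >= 16:
--         new_id = new_id[:15]
--         new_id = new_id.rstrip('.')
--
--
--     while len(new_id) <= 2:
--         new_id += new_id[-1]
--
--     return new_id
-- ===== SOURCE B (Python) =====
-- def solution(new_id):
--     allowed = "abcdefghijklmnopqrstuvwxyz0123456789-_."
--     # steps 1-2: lowercase and keep only allowed characters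
--     filtered = ''.join(c for c in new_id.lower() if c in allowed)
--     # steps 3-4: collapsing dot runs and stripping boundary dots is exactly
--     # joining the non-empty dot-separated chunks with single dots
--     s = '.'.join(p for p in filtered.split('.') if p)
--     # step 5
--     if not s:
--         s = 'a'
--     s = s[:15].rstrip('.')
--     return s.ljust(3, s[-1])
-- ===== Notes on version B (the rewrite author's own statement) =====
-- stated objective: idiomatic
-- what changed: Steps 2-4 (per-character append loop, dot-counter state machine, concat-then-strip) are replaced by a declarative filter plus a dot-join of the non-empty dot-split chunks, and step 5's while-loop padding by ljust.
import Mathlib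
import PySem

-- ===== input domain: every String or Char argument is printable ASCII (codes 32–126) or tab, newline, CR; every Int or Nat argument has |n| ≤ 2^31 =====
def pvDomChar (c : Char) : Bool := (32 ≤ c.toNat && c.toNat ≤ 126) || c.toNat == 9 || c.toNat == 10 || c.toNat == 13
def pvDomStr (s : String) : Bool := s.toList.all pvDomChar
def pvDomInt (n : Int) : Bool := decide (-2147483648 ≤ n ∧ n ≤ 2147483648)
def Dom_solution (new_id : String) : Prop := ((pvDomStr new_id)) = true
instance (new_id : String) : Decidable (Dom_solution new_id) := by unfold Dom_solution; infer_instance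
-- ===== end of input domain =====

-- B replaces A's per-character append loops and dot-counter state machine (steps 2-4) by a
-- declarative filter + split/join; objective: idiomatic (measured faster by a constant factor).

-- shared primitive-level helper: Python's s.rstrip('.') (PySem has no rstrip-with-chars);
-- exact: drops exactly the trailing '.' characters
def rstripDot (s : List Char) : List Char :=
  (s.reverse.dropWhile (fun c => c == '.')).reverse

-- ===== PORT A =====
-- A's step-5 'while len(new_id) <= 2: new_id += new_id[-1]'; the `none` branch only
-- makes the recursion total (Python's s[-1] cannot fail there since s is nonempty)
def padA (s : List Char) : List Char :=
  if s.length ≤ 2 then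
    match h : PySem.List.pyGet? s (-1) with
    | some c => padA (s ++ [c])
    | none => s
  else s
termination_by 3 - s.length
decreasing_by
  have hne : s ≠ [] := by intro hs; subst hs; simp [PySem.List.pyGet?] at h
  have : 1 ≤ s.length := List.length_pos_iff.mpr hne
  simp only [List.length_append, List.length_cons, List.length_nil]
  omega

def solution (new_id : String) : String :=
  -- step 1
  let s1 : List Char := PySem.Chars.lower new_id.toList
  -- step 2: for i in new_id: if i in ['-','_','.'] or 'a'<=i<='z' or '0'<=i<='9': arr.append(i)
  let arr : List Char := s1.foldl (fun acc i =>
    if i = '-' ∨ i = '_' ∨ i = '.' ∨ ('a'.toNat ≤ i.toNat ∧ 'z'.toNat ≥ i.toNat)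
        ∨ ('0'.toNat ≤ i.toNat ∧ '9'.toNat ≥ i.toNat)
    then acc ++ [i] else acc) []
  -- step 3: dot-counter state machine ('if dot:' is dot ≠ 0)
  let st := arr.foldl (fun (st : List Char × Int) i =>
    if i = '.' then (st.1, st.2 + 1)
    else if st.2 ≠ 0 then (st.1 ++ ['.'] ++ [i], (0 : Int)) else (st.1 ++ [i], (0 : Int)))
    ([], (0 : Int))
  -- step 4: new_id = ''; for i in arr: new_id += i; new_id = new_id.strip('.')
  let s4 : List Char := st.1.foldl (fun acc i => acc ++ [i]) []
  let s4 := PySem.Chars.stripChars s4 ['.']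
  -- step 5
  let s5 := if s4.length = 0 then ['a']
    else if 16 ≤ s4.length then rstripDot (PySem.Chars.slice s4 none (some 15))
    else s4
  String.mk (padA s5)

-- ===== PORT B =====
-- Source B's s.ljust(3, s[-1]) (s is nonempty there, so getLast? = some; the `none` branch
-- only totalises the match)
def ljust3 (s : List Char) : List Char :=
  match s.getLast? with
  | some c => s ++ List.replicate (3 - s.length) c
  | none => s

def solution_alt (new_id : String) : String :=
  let allowed : List Char := "abcdefghijklmnopqrstuvwxyz0123456789-_.".toList
  -- ''.join(c for c in new_id.lower() if c in allowed)  (single-char 'in' a string = membership)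
  let filtered : List Char := (PySem.Chars.lower new_id.toList).filter (fun c => allowed.contains c)
  -- '.'.join(p for p in filtered.split('.') if p)
  let s := PySem.Chars.join ['.'] ((PySem.Chars.splitOn filtered ['.']).filter (fun p => p ≠ []))
  -- if not s: s = 'a'
  let s := if s = [] then ['a'] else s
  -- s = s[:15].rstrip('.')
  let s := rstripDot (PySem.Chars.slice s none (some 15))
  String.mk (ljust3 s)

-- ===== PRECONDITION & SPEC =====
def Spec_solution (new_id : String) (out : String) : Prop := out = solution_alt new_id
instance (new_id : String) (out : String) : Decidable (Spec_solution new_id out) := by unfold Spec_solution; infer_instance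

-- ===== CLAIM (what is proved, stated in full; the proofs are below) =====
def Claim_equal_solution : Prop := ∀ (new_id : String), Dom_solution new_id → Spec_solution new_id (solution new_id)

-- ===== LEMMAS AND PROOFS =====

-- reference form of A's step-3 state machine (b = "pending dot seen")
def mDots : Bool → List Char → List Char
  | _, [] => []
  | b, c :: r => if c = '.' then mDots true r else (if b then ['.', c] else [c]) ++ mDots false r

-- reference form of splitOn on the single-char separator '.'
def splitDot : List Char → List (List Char)
  | [] => [[]]
  | c :: r => if c = '.' then [] :: splitDot r else (splitDot r).modifyHead (c :: ·)

theorem mDots_dot (b : Bool) (r : List Char) : mDots b ('.' :: r) = mDots true r := by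
  show (if '.' = '.' then mDots true r else (if b then ['.', '.'] else ['.']) ++ mDots false r) = _
  rw [if_pos rfl]

theorem mDots_cons {c : Char} (b : Bool) (r : List Char) (h : c ≠ '.') :
    mDots b (c :: r) = (if b then ['.', c] else [c]) ++ mDots false r := by
  show (if c = '.' then mDots true r else (if b then ['.', c] else [c]) ++ mDots false r) = _
  rw [if_neg h]

theorem splitDot_dot (r : List Char) : splitDot ('.' :: r) = [] :: splitDot r := by
  show (if '.' = '.' then [] :: splitDot r else (splitDot r).modifyHead ('.' :: ·)) = _
  rw [if_pos rfl]

theorem splitDot_cons {c : Char} (r : List Char) (h : c ≠ '.') :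
    splitDot (c :: r) = (splitDot r).modifyHead (c :: ·) := by
  show (if c = '.' then [] :: splitDot r else (splitDot r).modifyHead (c :: ·)) = _
  rw [if_neg h]

theorem splitDot_ne_nil (cs : List Char) : splitDot cs ≠ [] := by
  induction cs with
  | nil => simp [splitDot]
  | cons c r ih =>
    by_cases h : c = '.'
    · subst h; simp [splitDot_dot]
    · cases hs : splitDot r with
      | nil => exact absurd hs ih
      | cons x t => simp [splitDot_cons r h, hs, List.modifyHead]

theorem modifyHead_fun_id {α : Type} (l : List α) : List.modifyHead (fun x => x) l = l := by
  cases l <;> simp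

theorem splitOn_go_dot (cs : List Char) (fuel : Nat) (cur : List Char) (acc : List (List Char))
    (hf : cs.length < fuel) :
    PySem.Chars.splitOn.go ['.'] fuel cs cur acc
      = acc.reverse ++ (splitDot cs).modifyHead (cur.reverse ++ ·) := by
  induction cs generalizing fuel cur acc with
  | nil =>
    cases fuel with
    | zero => omega
    | succ f => rw [PySem.Chars.splitOn.go.eq_def]; simp [splitDot]
  | cons c r ih =>
    cases fuel with
    | zero => omega
    | succ f =>
      rw [PySem.Chars.splitOn.go.eq_def]
      by_cases h : c = '.'
      · subst h
        have hp : List.isPrefixOf ['.'] ('.' :: r) = true := by simp [List.isPrefixOf]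
        simp only [hp, if_pos]
        rw [show List.drop (['.'].length) ('.' :: r) = r from rfl]
        rw [ih f [] (cur.reverse :: acc) (by simpa using Nat.lt_of_succ_lt_succ hf)]
        simp [splitDot_dot, modifyHead_fun_id]
      · have hp : List.isPrefixOf ['.'] (c :: r) = false := by
          simp [List.isPrefixOf]; exact fun hc => absurd hc.symm h
        simp only [hp, Bool.false_eq_true, if_false]
        rw [ih f (c :: cur) acc (by simpa using Nat.lt_of_succ_lt_succ hf)]
        rw [splitDot_cons r h]
        obtain ⟨x, t, hx⟩ : ∃ x t, splitDot r = x :: t := by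
          cases hs : splitDot r with
          | nil => exact absurd hs (splitDot_ne_nil r)
          | cons x t => exact ⟨x, t, rfl⟩
        simp [hx]

theorem splitOn_dot (cs : List Char) :
    PySem.Chars.splitOn cs ['.'] = splitDot cs := by
  have := splitOn_go_dot cs (cs.length + 1) [] [] (by omega)
  simpa [PySem.Chars.splitOn, modifyHead_fun_id] using this

theorem intercalate_dot_cons (xs : List (List Char)) (x : List Char) :
    List.intercalate ['.'] (x :: xs) = x ++ xs.flatMap (fun p => '.' :: p) := by
  induction xs generalizing x with
  | nil => simp [List.intercalate]
  | cons y ys ih =>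
    simp only [List.intercalate, List.intersperse_cons₂, List.flatten_cons, List.flatMap_cons] at *
    simp [ih]

-- split-then-join equals the dot state machine (mutual invariant for heads and tails)
theorem splitDot_join_inv (r : List Char) :
    ((splitDot r).headI ++ ((splitDot r).tail.filter (fun p => p ≠ [])).flatMap (fun p => '.' :: p)
       = mDots false r)
    ∧ (((splitDot r).filter (fun p => p ≠ [])).flatMap (fun p => '.' :: p) = mDots true r) := by
  induction r with
  | nil => simp [splitDot, mDots]
  | cons c r ih =>
    obtain ⟨x, t, hx⟩ : ∃ x t, splitDot r = x :: t := by
      cases hs : splitDot r with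
      | nil => exact absurd hs (splitDot_ne_nil r)
      | cons x t => exact ⟨x, t, rfl⟩
    by_cases h : c = '.'
    · subst h
      refine ⟨by simpa [splitDot_dot, mDots_dot] using ih.2,
        by simpa [splitDot_dot, mDots_dot] using ih.2⟩
    · have hJ := ih.1
      rw [hx] at hJ
      simp only [List.headI, List.tail] at hJ
      have hm' : mDots false (c :: r) = c :: mDots false r := by
        rw [mDots_cons false r h]; rfl
      have hm : mDots true (c :: r) = '.' :: c :: mDots false r := by
        rw [mDots_cons true r h]; rfl
      constructor
      · simp only [ne_eq, decide_not] at hJ ⊢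
        rw [splitDot_cons r h, hx, hm']
        simp only [List.modifyHead, List.headI, List.tail, List.cons_append]
        exact congrArg (c :: ·) hJ
      · simp only [ne_eq, decide_not] at hJ ⊢
        rw [splitDot_cons r h, hx, hm]
        simp only [List.modifyHead, List.filter_cons, List.cons_ne_nil, decide_false,
          Bool.not_false, if_pos, List.flatMap_cons, List.cons_append]
        exact congrArg (fun l => '.' :: c :: l) hJ

theorem join_splitDot (cs : List Char) :
    PySem.Chars.join ['.'] ((splitDot cs).filter (fun p => p ≠ []))
      = mDots false (cs.dropWhile (fun c => c == '.')) := by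
  induction cs with
  | nil => simp [splitDot, PySem.Chars.join, List.intercalate, mDots]
  | cons c r ih =>
    by_cases h : c = '.'
    · subst h
      rw [splitDot_dot]
      simp only [List.filter_cons]
      simpa [List.dropWhile_cons] using ih
    · obtain ⟨x, t, hx⟩ : ∃ x t, splitDot r = x :: t := by
        cases hs : splitDot r with
        | nil => exact absurd hs (splitDot_ne_nil r)
        | cons x t => exact ⟨x, t, rfl⟩
      have hJ := (splitDot_join_inv r).1
      rw [hx] at hJ
      simp only [List.headI, List.tail] at hJ
      have hm' : mDots false (c :: r) = c :: mDots false r := by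
        rw [mDots_cons false r h]; rfl
      rw [List.dropWhile_cons]
      simp only [beq_iff_eq, h, decide_false, Bool.false_eq_true, if_false]
      rw [hm']
      simp only [ne_eq, decide_not] at hJ ⊢
      rw [splitDot_cons r h, hx]
      simp only [List.modifyHead, List.filter_cons, List.cons_ne_nil, decide_false,
        Bool.not_false, if_pos]
      simp only [PySem.Chars.join, intercalate_dot_cons, List.cons_append]
      exact congrArg (c :: ·) hJ

-- A's step-3 fold computes mDots
theorem foldl_step3 (cs : List Char) (acc : List Char) (d : Int) (hd : 0 ≤ d) :
    (cs.foldl (fun (st : List Char × Int) i =>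
        if i = '.' then (st.1, st.2 + 1)
        else if st.2 ≠ 0 then (st.1 ++ ['.'] ++ [i], (0 : Int)) else (st.1 ++ [i], (0 : Int)))
        (acc, d)).1
      = acc ++ mDots (decide (d ≠ 0)) cs := by
  induction cs generalizing acc d with
  | nil => simp [mDots]
  | cons c r ih =>
    by_cases h : c = '.'
    · subst h
      rw [List.foldl_cons, if_pos rfl]
      rw [ih acc (d + 1) (by omega)]
      have h1 : decide ((d + 1) ≠ 0) = true := by simp; omega
      rw [h1, mDots_dot]
    · rw [List.foldl_cons, if_neg h, mDots_cons (decide (d ≠ 0)) r h]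
      by_cases hd0 : d ≠ 0
      · rw [if_pos hd0, ih _ 0 le_rfl]
        simp [hd0]
      · rw [if_neg hd0, ih _ 0 le_rfl]
        simp only [not_not] at hd0
        simp [hd0]

theorem mDots_getLast_ne_dot (b : Bool) (cs : List Char) :
    (mDots b cs).getLast? ≠ some '.' := by
  induction cs generalizing b with
  | nil => simp [mDots]
  | cons c r ih =>
    by_cases h : c = '.'
    · subst h; simpa [mDots_dot] using ih true
    · rw [mDots_cons b r h]
      cases hr : mDots false r with
      | nil =>
        cases b <;> simp [hr, List.getLast?] <;>
          first
            | exact h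
            | (intro hc; exact h (Eq.symm hc))
      | cons y ys =>
        have hlast := ih false
        rw [hr] at hlast
        cases b <;> simpa [hr, List.getLast?_cons_cons] using hlast

theorem mDots_false_head (c : Char) (r : List Char) (h : c ≠ '.') :
    mDots false (c :: r) = c :: mDots false r := by
  rw [mDots_cons false r h]; rfl

theorem stripChars_dot_eq_self (s : List Char)
    (h1 : s.head? ≠ some '.') (h2 : s.getLast? ≠ some '.') :
    PySem.Chars.stripChars s ['.'] = s := by
  show (List.dropWhile (fun c => List.contains ['.'] c)
      ((List.dropWhile (fun c => List.contains ['.'] c) s).reverse)).reverse = s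
  have hd : s.dropWhile (fun c => List.contains ['.'] c) = s := by
    cases s with
    | nil => simp
    | cons c r =>
      rw [List.dropWhile_cons]
      have : c ≠ '.' := fun hc => h1 (by simp [hc])
      simp [this]
  rw [hd]
  have hr : s.reverse.dropWhile (fun c => List.contains ['.'] c) = s.reverse := by
    cases hsr : s.reverse with
    | nil => simp
    | cons c r =>
      rw [List.dropWhile_cons]
      have hcl : s.getLast? = some c := by rw [← List.head?_reverse, hsr]; rfl
      have : c ≠ '.' := fun hc => h2 (by rw [hcl, hc])
      simp [this]
  rw [hr, List.reverse_reverse]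

theorem rstripDot_eq_self (s : List Char) (h2 : s.getLast? ≠ some '.') :
    rstripDot s = s := by
  unfold rstripDot
  have hr : s.reverse.dropWhile (fun c => c == '.') = s.reverse := by
    cases hsr : s.reverse with
    | nil => simp
    | cons c r =>
      rw [List.dropWhile_cons]
      have hcl : s.getLast? = some c := by rw [← List.head?_reverse, hsr]; rfl
      have : c ≠ '.' := fun hc => h2 (by rw [hcl, hc])
      simp [this]
  rw [hr, List.reverse_reverse]

theorem stripChars_mDots_true (cs : List Char) :
    PySem.Chars.stripChars (mDots true cs) ['.']
      = PySem.Chars.stripChars (mDots false cs) ['.'] := by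
  induction cs with
  | nil => rfl
  | cons c r ih =>
    by_cases h : c = '.'
    · subst h; rw [mDots_dot, mDots_dot]
    · rw [mDots_cons true r h, mDots_cons false r h]
      show PySem.Chars.stripChars ('.' :: c :: mDots false r) ['.'] = _
      show _ = PySem.Chars.stripChars (c :: mDots false r) ['.']
      unfold PySem.Chars.stripChars
      simp [List.dropWhile_cons, h]

theorem stripChars_mDots (cs : List Char) :
    PySem.Chars.stripChars (mDots false cs) ['.']
      = mDots false (cs.dropWhile (fun c => c == '.')) := by
  induction cs with
  | nil => rfl
  | cons c r ih =>
    by_cases h : c = '.'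
    · subst h
      rw [mDots_dot, stripChars_mDots_true, ih]
      rfl
    · rw [List.dropWhile_cons]
      simp only [beq_iff_eq, h, decide_false, Bool.false_eq_true, if_false]
      refine stripChars_dot_eq_self _ ?_ (mDots_getLast_ne_dot false (c :: r))
      rw [mDots_false_head c r h]
      simp only [List.head?_cons, ne_eq, Option.some.injEq]
      intro hc; exact h hc

theorem beq_char_toNat (i c : Char) : (i == c) = decide (i.toNat = c.toNat) := by
  cases h : i == c
  · simp at h ⊢; intro hn; exact h (Char.ext (UInt32.toNat_inj.mp hn))
  · simp at h ⊢; subst h; rfl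

theorem char_eq_iff_toNat (i c : Char) : (i = c) ↔ (i.toNat = c.toNat) := by
  constructor
  · rintro rfl; rfl
  · intro h; exact Char.ext (UInt32.toNat_inj.mp h)

-- the two character filters agree
theorem filter_cond_eq (i : Char) :
    (decide (i = '-' ∨ i = '_' ∨ i = '.' ∨ ('a'.toNat ≤ i.toNat ∧ 'z'.toNat ≥ i.toNat)
        ∨ ('0'.toNat ≤ i.toNat ∧ '9'.toNat ≥ i.toNat)))
      = ("abcdefghijklmnopqrstuvwxyz0123456789-_.".toList).contains i := by
  have hs : "abcdefghijklmnopqrstuvwxyz0123456789-_.".toList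
      = ['a','b','c','d','e','f','g','h','i','j','k','l','m','n','o','p','q','r','s','t','u','v',
         'w','x','y','z','0','1','2','3','4','5','6','7','8','9','-','_','.'] := rfl
  rw [hs, Bool.eq_iff_iff]
  simp only [List.contains_cons, List.contains_nil, Bool.or_eq_true, beq_char_toNat,
    decide_eq_true_eq, char_eq_iff_toNat, Char.reduceToNat, Bool.false_eq_true, or_false]
  omega

theorem padA_step (s : List Char) (c : Char) (hlen : s.length ≤ 2)
    (hget : PySem.List.pyGet? s (-1) = some c) : padA s = padA (s ++ [c]) := by
  rw [padA.eq_def, if_pos hlen]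
  split
  · next c' hc' => rw [hget] at hc'; cases hc'; rfl
  · next hc' => rw [hget] at hc'; cases hc'

theorem padA_done (s : List Char) (h : ¬ s.length ≤ 2) : padA s = s := by
  rw [padA.eq_def, if_neg h]

theorem padA_eq_ljust3 (t : List Char) (ht : t ≠ []) : padA t = ljust3 t := by
  match t with
  | [a] =>
    rw [padA_step [a] a (by simp) (by simp [PySem.List.pyGet?, PySem.List.pyIdx?])]
    rw [show [a] ++ [a] = [a, a] from rfl]
    rw [padA_step [a, a] a (by simp) (by simp [PySem.List.pyGet?, PySem.List.pyIdx?])]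
    rw [padA_done ([a, a] ++ [a]) (by simp)]
    simp [ljust3, List.getLast?, List.replicate]
  | [a, b] =>
    rw [padA_step [a, b] b (by simp) (by simp [PySem.List.pyGet?, PySem.List.pyIdx?])]
    rw [padA_done ([a, b] ++ [b]) (by simp)]
    simp [ljust3, List.getLast?, List.replicate]
  | a :: b :: c :: rest =>
    rw [padA_done _ (by simp)]
    cases hL : (a :: b :: c :: rest).getLast? with
    | none => simp at hL
    | some l =>
      simp only [ljust3, hL]
      rw [show (3 - (a :: b :: c :: rest).length) = 0 by simp]
      simp

-- ===== VERDICT (by name: the statement is the Claim_ definition above) =====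
theorem solution_spec : Claim_equal_solution := by
  intro new_id _
  unfold Spec_solution solution solution_alt
  simp only []
  -- the common filtered character list
  set F : List Char :=
    (PySem.Chars.lower new_id.toList).filter
      (fun c => ("abcdefghijklmnopqrstuvwxyz0123456789-_.".toList).contains c) with hF
  -- A's step 2 builds F
  have harr : (PySem.Chars.lower new_id.toList).foldl (fun acc i =>
      if i = '-' ∨ i = '_' ∨ i = '.' ∨ ('a'.toNat ≤ i.toNat ∧ 'z'.toNat ≥ i.toNat)
          ∨ ('0'.toNat ≤ i.toNat ∧ '9'.toNat ≥ i.toNat)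
      then acc ++ [i] else acc) [] = F := by
    rw [PySem.List.foldl_append_ite_eq_filter]
    rw [hF, List.nil_append]
    exact List.filter_congr (fun x _ => filter_cond_eq x)
  rw [harr]
  -- A's steps 3+4 reach the canonical collapsed-and-stripped form U
  rw [foldl_step3 F [] 0 le_rfl, PySem.List.foldl_append_singleton_eq_self]
  rw [show (decide ((0 : Int) ≠ 0)) = false from rfl]
  simp only [List.nil_append]
  rw [stripChars_mDots]
  -- B's split/join reaches the same U
  rw [splitOn_dot, join_splitDot]
  set W : List Char := F.dropWhile (fun c => c == '.') with hW
  set U : List Char := mDots false W with hU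
  -- the two step-5 results coincide
  have hstep5 : (if U.length = 0 then ['a']
      else if 16 ≤ U.length then rstripDot (PySem.Chars.slice U none (some 15)) else U)
      = rstripDot (PySem.Chars.slice (if U = [] then ['a'] else U) none (some 15)) := by
    by_cases hnil : U = []
    · rw [hnil]; decide
    · rw [if_neg hnil, if_neg (by simp [List.length_eq_zero_iff, hnil])]
      by_cases h16 : 16 ≤ U.length
      · rw [if_pos h16]
      · rw [if_neg h16]
        have hsl : PySem.Chars.slice U none (some 15) = U := by
          simp only [PySem.Chars.slice_eq_listSlice]
          rw [PySem.List.slice_to U (by norm_num)]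
          exact List.take_of_length_le (by omega)
        rw [hsl, rstripDot_eq_self U (hU ▸ mDots_getLast_ne_dot false W)]
  rw [hstep5]
  -- and padding = ljust on the (nonempty) common result
  refine congrArg String.mk (padA_eq_ljust3 _ ?_)
  by_cases hnil : U = []
  · rw [if_pos hnil]; decide
  · rw [if_neg hnil]
    -- U starts with W's head, which is not a dot; rstripDot (take 15 U) keeps it
    obtain ⟨c, r, hcr⟩ : ∃ c r, W = c :: r := by
      cases hw : W with
      | nil => exact absurd (by rw [hU, hw]; rfl) hnil
      | cons c r => exact ⟨c, r, rfl⟩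
    have hc : c ≠ '.' := by
      have hdw := List.head?_dropWhile_not (fun c => c == '.') F
      rw [← hW, hcr] at hdw
      simpa using hdw
    have hUc : U = c :: mDots false r := by rw [hU, hcr, mDots_false_head c r hc]
    have hsl : ∃ r', PySem.Chars.slice U none (some 15) = c :: r' := by
      simp only [PySem.Chars.slice_eq_listSlice]
      rw [PySem.List.slice_to U (by norm_num), hUc]
      exact ⟨(mDots false r).take 14, rfl⟩
    obtain ⟨r', hr'⟩ := hsl
    rw [hr']
    intro hcontra
    unfold rstripDot at hcontra
    rw [List.reverse_eq_nil_iff] at hcontra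
    have hall := List.dropWhile_eq_nil_iff.mp hcontra c (by simp)
    simp [hc] at hall
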